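-- pv_equiv track=rewrite | github.com/911AstalusAdrian/S1-FP | Projects/a1-911AstalusAdrian/p2.py | factor_product
-- ===== SOURCE A (Python) =====
-- def factor_product(n):
--     p = 1
--     if n % 2 == 0:
--         p = p*2
--         while n % 2 == 0:
--             n //= 2
--     for index in range(3, n+1):
--         if n % index == 0:
--             p = p*index
--             while n % index == 0:
--                 n //= index
--
--     return p
-- ===== SOURCE B (Python) =====
-- def factor_product(n):
--     p = 1
--     if n % 2 == 0:
--         p = p * 2
--         while n % 2 == 0:
--             n //= 2
--     i = 3
--     while i * i <= n:
--         if n % i == 0: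
--             p = p * i
--             while n % i == 0:
--                 n //= i
--         i += 2
--     if n > 1:
--         p = p * n
--     return p
-- ===== Notes on version B (the rewrite author's own statement) =====
-- stated objective: faster
-- what changed: Trial division only up to sqrt(n) over odd candidates, multiplying in the remaining prime residual if it exceeds 1, instead of scanning every integer from 3 to n.
import Mathlib
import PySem

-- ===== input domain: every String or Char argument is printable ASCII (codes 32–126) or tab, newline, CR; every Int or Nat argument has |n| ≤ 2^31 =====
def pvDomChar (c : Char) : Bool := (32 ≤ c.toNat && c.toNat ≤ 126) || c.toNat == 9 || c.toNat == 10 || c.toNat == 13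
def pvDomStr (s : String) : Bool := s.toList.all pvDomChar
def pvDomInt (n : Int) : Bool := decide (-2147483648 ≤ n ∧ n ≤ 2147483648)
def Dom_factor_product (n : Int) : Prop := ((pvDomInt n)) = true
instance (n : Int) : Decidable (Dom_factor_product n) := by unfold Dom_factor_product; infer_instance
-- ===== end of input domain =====

-- B changes the algorithm: trial division only up to sqrt(n) (odd candidates), multiplying in the
-- prime residual left over, instead of A's scan of every integer from 3 to n.

-- ===== PORT A =====
-- the 'while n % k == 0: n //= k' loop of both Pythons; fuel = |n|+1 only makes it total
-- (it strictly shrinks |n| on every division taken, so this fuel always suffices)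
def pvStrip (fuel : Nat) (k n : Int) : Int :=
  match fuel with
  | 0 => n
  | f + 1 => if PySem.Int.mod n k = 0 then pvStrip f k (PySem.Int.floordiv n k) else n

def factor_product (n : Int) : Int :=
  let s0 : Int × Int :=
    if PySem.Int.mod n 2 = 0 then (1 * 2, pvStrip (n.natAbs + 1) 2 n) else (1, n)
  ((PySem.List.pyRange 3 (s0.2 + 1) 1).foldl
    (fun (s : Int × Int) idx =>
      if PySem.Int.mod s.2 idx = 0 then (s.1 * idx, pvStrip (s.2.natAbs + 1) idx s.2) else s)
    s0).1

-- ===== PORT B =====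
-- the 'while i * i <= n' loop of Source B; fuel = |n|+1 only makes it total (i grows past sqrt n)
def pvBLoop (fuel : Nat) (i p n : Int) : Int × Int :=
  match fuel with
  | 0 => (p, n)
  | f + 1 =>
    if i * i ≤ n then
      if PySem.Int.mod n i = 0 then
        pvBLoop f (i + 2) (p * i) (pvStrip (n.natAbs + 1) i n)
      else pvBLoop f (i + 2) p n
    else (p, n)

def factor_product_alt (n : Int) : Int :=
  let s0 : Int × Int :=
    if PySem.Int.mod n 2 = 0 then (1 * 2, pvStrip (n.natAbs + 1) 2 n) else (1, n)
  let s1 := pvBLoop (s0.2.natAbs + 1) 3 s0.1 s0.2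
  if s1.2 > 1 then s1.1 * s1.2 else s1.1

-- ===== PRECONDITION & SPEC =====
-- Pre_ excludes only n = 0, on which the Python A (and B) loops forever in 'while n % 2 == 0'.
def Pre_factor_product (n : Int) : Prop := n ≠ 0
instance (n : Int) : Decidable (Pre_factor_product n) := by unfold Pre_factor_product; infer_instance
def pvWitness_factor_product : Int := 12

def Spec_factor_product (n : Int) (out : Int) : Prop := out = factor_product_alt n
instance (n : Int) (out : Int) : Decidable (Spec_factor_product n out) := by unfold Spec_factor_product; infer_instance

-- ===== CLAIM (what is proved, stated in full; the proofs are below) =====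
def Claim_equal_factor_product : Prop := ∀ (n : Int), Dom_factor_product n → Pre_factor_product n → Spec_factor_product n (factor_product n)

-- ===== LEMMAS AND PROOFS =====

-- abbreviation for A's fold step (proof-local)
def pvStepA (s : Int × Int) (idx : Int) : Int × Int :=
  if PySem.Int.mod s.2 idx = 0 then (s.1 * idx, pvStrip (s.2.natAbs + 1) idx s.2) else s

lemma pvStrip_spec : ∀ (fuel : Nat) (k n : Int), 2 ≤ k → 1 ≤ n → n.natAbs ≤ fuel →
    1 ≤ pvStrip fuel k n ∧ pvStrip fuel k n ∣ n ∧ ¬ (k ∣ pvStrip fuel k n) := by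
  intro fuel
  induction fuel with
  | zero => intro k n hk hn hf; omega
  | succ f ih =>
    intro k n hk hn hf
    simp only [pvStrip]
    by_cases hd : PySem.Int.mod n k = 0
    · rw [if_pos hd]
      have hdvd : k ∣ n := (PySem.Int.mod_eq_zero_iff_dvd n k).mp hd
      obtain ⟨m, hm⟩ := hdvd
      have hfd : PySem.Int.floordiv n k = m := by
        rw [PySem.Int.floordiv_eq_ediv_of_pos (by omega)]
        rw [hm]; exact Int.mul_ediv_cancel_left m (by omega)
      have hm1 : 1 ≤ m := by nlinarith
      have hmn : m < n := by nlinarith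
      have hfm : m.natAbs ≤ f := by omega
      rw [hfd]
      obtain ⟨h1, h2, h3⟩ := ih k m hk hm1 hfm
      exact ⟨h1, h2.trans ⟨k, by rw [hm]; ring⟩, h3⟩
    · rw [if_neg hd]
      refine ⟨hn, dvd_refl n, ?_⟩
      intro hkd
      exact hd ((PySem.Int.mod_eq_zero_iff_dvd n k).mpr hkd)

lemma pvStrip_neg : ∀ (fuel : Nat) (n : Int), n ≤ -1 → pvStrip fuel 2 n ≤ -1 := by
  intro fuel
  induction fuel with
  | zero => intro n hn; simpa [pvStrip] using hn
  | succ f ih =>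
    intro n hn
    simp only [pvStrip]
    by_cases hd : PySem.Int.mod n 2 = 0
    · rw [if_pos hd]
      have hdvd : (2:Int) ∣ n := (PySem.Int.mod_eq_zero_iff_dvd n 2).mp hd
      obtain ⟨m, hm⟩ := hdvd
      have hfd : PySem.Int.floordiv n 2 = m := by
        rw [PySem.Int.floordiv_eq_ediv_of_pos (by omega)]
        rw [hm]; exact Int.mul_ediv_cancel_left m (by omega)
      rw [hfd]
      exact ih m (by omega)
    · rw [if_neg hd]; exact hn

-- stripping n by itself (n ≥ 2) gives 1
lemma pvStrip_self : ∀ (fuel : Nat) (n : Int), 2 ≤ n → 2 ≤ fuel → pvStrip fuel n n = 1 := by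
  intro fuel n hn hf
  obtain ⟨f, rfl⟩ : ∃ f, fuel = f + 2 := ⟨fuel - 2, by omega⟩
  have h1 : PySem.Int.mod n n = 0 := (PySem.Int.mod_eq_zero_iff_dvd n n).mpr (dvd_refl n)
  have h2 : PySem.Int.floordiv n n = 1 := by
    rw [PySem.Int.floordiv_eq_ediv_of_pos (by omega)]
    exact Int.ediv_self (by omega)
  have h3 : PySem.Int.mod 1 n ≠ 0 := by
    intro h
    have := (PySem.Int.mod_eq_zero_iff_dvd 1 n).mp h
    have := Int.le_of_dvd (by omega) this
    omega
  simp only [pvStrip, h1, h2, if_pos, if_neg h3]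

-- fold of A's step over a range none of whose elements divide n leaves the state unchanged
lemma foldA_skip : ∀ (c : Nat) (a b p n : Int), (b - a).toNat ≤ c →
    (∀ j, a ≤ j → j < b → ¬ (j ∣ n)) →
    (PySem.List.pyRange a b 1).foldl pvStepA (p, n) = (p, n) := by
  intro c
  induction c with
  | zero =>
    intro a b p n hc _
    rw [PySem.List.pyRange_one_eq_nil (by omega)]
    rfl
  | succ k ih =>
    intro a b p n hc hskip
    by_cases hab : a < b
    · rw [PySem.List.pyRange_one_cons hab]
      have hstep : pvStepA (p, n) a = (p, n) := by
        have : ¬ (a ∣ n) := hskip a le_rfl hab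
        simp only [pvStepA]
        rw [if_neg (fun h => this ((PySem.Int.mod_eq_zero_iff_dvd n a).mp h))]
      rw [List.foldl_cons, hstep]
      exact ih (a+1) b p n (by omega) (fun j hj1 hj2 => hskip j (by omega) hj2)
    · rw [PySem.List.pyRange_one_eq_nil (by omega)]
      rfl

-- no divisor of n in [2, i) and i² > n make n equal to 1 or prime; A's scan then yields the residual
lemma tail_prime : ∀ (i p n bound : Int), 3 ≤ i → 1 ≤ n → n ≤ bound →
    (∀ d, 2 ≤ d → d < i → ¬ (d ∣ n)) → ¬ (i * i ≤ n) →
    ((PySem.List.pyRange i (bound + 1) 1).foldl pvStepA (p, n)).1 =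
      (if n > 1 then p * n else p) := by
  intro i p n bound hi hn hnb hinv hii
  by_cases hn1 : n = 1
  · subst hn1
    rw [foldA_skip (bound + 1 - i).toNat i (bound + 1) p 1 le_rfl]
    · rw [if_neg (by omega)]
    · intro j hj1 hj2 hdvd
      have := Int.le_of_dvd (by omega) hdvd
      omega
  · have hn2 : 2 ≤ n := by omega
    have hin : i ≤ n := by
      by_contra hlt
      exact hinv n hn2 (by omega) (dvd_refl n)
    rw [PySem.List.pyRange_one_append i n (bound + 1) hin (by omega), List.foldl_append]
    rw [foldA_skip (n - i).toNat i n p n le_rfl ?_]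
    · rw [PySem.List.pyRange_one_cons (by omega), List.foldl_cons]
      have hstep : pvStepA (p, n) n = (p * n, 1) := by
        simp only [pvStepA]
        rw [if_pos ((PySem.Int.mod_eq_zero_iff_dvd n n).mpr (dvd_refl n))]
        rw [pvStrip_self (n.natAbs + 1) n hn2 (by omega)]
      rw [hstep]
      rw [foldA_skip (bound + 1 - (n+1)).toNat (n+1) (bound+1) (p*n) 1 le_rfl ?_]
      · rw [if_pos (by omega)]
      · intro j hj1 hj2 hdvd
        have := Int.le_of_dvd (by omega) hdvd
        omega
    · intro j hj1 hj2 hdvd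
      obtain ⟨c, hc⟩ := hdvd
      have hc1 : 1 ≤ c := by nlinarith
      have hc2 : 2 ≤ c := by
        by_contra h
        have hc1' : c = 1 := by omega
        rw [hc1', mul_one] at hc
        omega
      have hci : c < i := by nlinarith
      exact hinv c hc2 hci ⟨j, by rw [hc]; ring⟩

-- the main bridge: with no divisor of n below i, A's remaining scan equals B's loop + residual
lemma bridge : ∀ (fuel : Nat) (i p n bound : Int), 3 ≤ i → i % 2 = 1 →
    1 ≤ n → n ≤ bound → (∀ d, 2 ≤ d → d < i → ¬ (d ∣ n)) →
    bound + 1 - i ≤ (fuel : Int) →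
    ((PySem.List.pyRange i (bound + 1) 1).foldl pvStepA (p, n)).1 =
      (let s := pvBLoop fuel i p n; if s.2 > 1 then s.1 * s.2 else s.1) := by
  intro fuel
  induction fuel with
  | zero =>
    intro i p n bound hi hodd hn hnb hinv hfuel
    have hn1 : n = 1 := by
      by_contra h
      exact hinv n (by omega) (by omega) (dvd_refl n)
    subst hn1
    simp only [pvBLoop]
    rw [PySem.List.pyRange_one_eq_nil (by omega)]
    simp
  | succ f ih =>
    intro i p n bound hi hodd hn hnb hinv hfuel
    by_cases hii : i * i ≤ n
    · have hii' : i + 1 < i * i := by nlinarith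
      have hib : i + 1 ≤ bound := by omega
      rw [PySem.List.pyRange_one_cons (by omega), List.foldl_cons,
          PySem.List.pyRange_one_cons (by omega), List.foldl_cons]
      by_cases hd : PySem.Int.mod n i = 0
      · have hdvd : i ∣ n := (PySem.Int.mod_eq_zero_iff_dvd n i).mp hd
        have hstep1 : pvStepA (p, n) i = (p * i, pvStrip (n.natAbs + 1) i n) := by
          simp only [pvStepA]; rw [if_pos hd]
        obtain ⟨hm1, hm2, hm3⟩ :=
          pvStrip_spec (n.natAbs + 1) i n (by omega) hn (by omega)
        set m := pvStrip (n.natAbs + 1) i n with hmdef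
        have hmodd : ¬ ((2:Int) ∣ m) := fun h2 => hinv 2 le_rfl (by omega) (h2.trans hm2)
        have hstep2 : pvStepA (p * i, m) (i + 1) = (p * i, m) := by
          simp only [pvStepA]
          rw [if_neg]
          intro h
          have : (i + 1) ∣ m := (PySem.Int.mod_eq_zero_iff_dvd m (i+1)).mp h
          exact hmodd (dvd_trans ⟨(i+1)/2, by omega⟩ this)
        rw [hstep1, hstep2]
        have hmn : m ≤ n := Int.le_of_dvd (by omega) hm2
        have hinv' : ∀ d, 2 ≤ d → d < i + 2 → ¬ (d ∣ m) := by
          intro d hd2 hdi hdvd'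
          rcases Int.lt_or_le d i with h | h
          · exact hinv d hd2 h (hdvd'.trans hm2)
          · rcases eq_or_lt_of_le h with h' | h'
            · exact hm3 (h' ▸ hdvd')
            · have hde : d = i + 1 := by omega
              subst hde
              exact hmodd (dvd_trans ⟨(i+1)/2, by omega⟩ hdvd')
        have := ih (i + 2) (p * i) m bound (by omega) (by omega) hm1 (by omega) hinv' (by omega)
        simp only [pvBLoop, if_pos hii, if_pos hd]
        rw [show i + 1 + 1 = i + 2 by ring]
        exact this
      · have hnd : ¬ (i ∣ n) := fun h => hd ((PySem.Int.mod_eq_zero_iff_dvd n i).mpr h)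
        have hnodd : ¬ ((2:Int) ∣ n) := hinv 2 le_rfl (by omega)
        have hstep1 : pvStepA (p, n) i = (p, n) := by
          simp only [pvStepA]; rw [if_neg hd]
        have hstep2 : pvStepA (p, n) (i + 1) = (p, n) := by
          simp only [pvStepA]
          rw [if_neg]
          intro h
          have : (i + 1) ∣ n := (PySem.Int.mod_eq_zero_iff_dvd n (i+1)).mp h
          exact hnodd (dvd_trans ⟨(i+1)/2, by omega⟩ this)
        rw [hstep1, hstep2]
        have hinv' : ∀ d, 2 ≤ d → d < i + 2 → ¬ (d ∣ n) := by
          intro d hd2 hdi hdvd'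
          rcases Int.lt_or_le d i with h | h
          · exact hinv d hd2 h hdvd'
          · rcases eq_or_lt_of_le h with h' | h'
            · exact hnd (h' ▸ hdvd')
            · have hde : d = i + 1 := by omega
              subst hde
              exact hnodd (dvd_trans ⟨(i+1)/2, by omega⟩ hdvd')
        have := ih (i + 2) p n bound (by omega) (by omega) hn hnb hinv' (by omega)
        simp only [pvBLoop, if_pos hii, if_neg hd]
        rw [show i + 1 + 1 = i + 2 by ring]
        exact this
    · simp only [pvBLoop, if_neg hii]
      exact tail_prime i p n bound hi hn hnb hinv hii

-- A and B share the 2-stripping prologue; this relates A's scan from 3 to B's loop, for odd (or ≤ 1) m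
lemma tail_eq : ∀ (p m : Int), (1 ≤ m → ¬ ((2:Int) ∣ m)) →
    ((PySem.List.pyRange 3 (m + 1) 1).foldl pvStepA (p, m)).1 =
      (let s := pvBLoop (m.natAbs + 1) 3 p m; if s.2 > 1 then s.1 * s.2 else s.1) := by
  intro p m hodd
  by_cases hm : 3 ≤ m
  · exact bridge (m.natAbs + 1) 3 p m m (by omega) (by decide) (by omega) le_rfl
      (fun d hd2 hd3 => by
        have hd : d = 2 := by omega
        subst hd
        exact hodd (by omega)) (by omega)
  · have hm2 : m ≠ 2 := fun h => hodd (by omega) (h ▸ ⟨1, by ring⟩)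
    have hm1 : m ≤ 1 := by omega
    rw [PySem.List.pyRange_one_eq_nil (by omega)]
    simp only [List.foldl_nil, pvBLoop]
    rw [if_neg (by omega : ¬ (3:Int) * 3 ≤ m), if_neg (by omega : ¬ m > 1)]

-- ===== VERDICT (by name: the statement is the Claim_ definition above) =====
theorem factor_product_spec : Claim_equal_factor_product := by
  intro n _ hpre
  show factor_product n = factor_product_alt n
  simp only [factor_product, factor_product_alt]
  have hstep : (fun (s : Int × Int) idx =>
      if PySem.Int.mod s.2 idx = 0 then (s.1 * idx, pvStrip (s.2.natAbs + 1) idx s.2) else s)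
      = pvStepA := rfl
  rw [hstep]
  by_cases hE : PySem.Int.mod n 2 = 0
  · simp only [if_pos hE]
    apply tail_eq
    intro h1
    rcases Int.lt_or_le n 0 with hneg | hpos
    · have := pvStrip_neg (n.natAbs + 1) n (by omega)
      omega
    · have hn1 : 1 ≤ n := by
        rcases Int.lt_or_le 0 n with h | h
        · omega
        · exact absurd (by omega : n = 0) hpre
      exact (pvStrip_spec (n.natAbs + 1) 2 n le_rfl hn1 (by omega)).2.2
  · simp only [if_neg hE]
    apply tail_eq
    intro _ h2
    exact hE ((PySem.Int.mod_eq_zero_iff_dvd n 2).mpr h2)
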